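-- pv_equiv track=rewrite | github.com/jeanchen2425/COG260 | project/wcs_data_notebook/wcs_helper_functions.py | parseBKFociGridCoords
-- ===== SOURCE A (Python) =====
-- def parseBKFociGridCoords(gridcoord):
--     if gridcoord == "?":
--         # One of the data points is just ?
--         return []
--     tokens = []
--     while gridcoord:
--         if gridcoord[0] == "," or (len(gridcoord) > 1 and gridcoord[1] == ","):
--             tokens.append(gridcoord[0])
--             gridcoord = gridcoord[1:]
--         elif len(gridcoord) < 3 or not gridcoord[2].isnumeric() or gridcoord[0] == ".":
--             # A0
--             tokens.append(gridcoord[:2])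
--             gridcoord = gridcoord[2:]
--         else:
--             # A13
--             tokens.append(gridcoord[:3])
--             gridcoord = gridcoord[3:]
--     coords = []
--     while tokens:
--         token = tokens.pop(0)
--         row, token = token[0], token[1:]
--         if tokens and tokens[0] == "..":
--             # Range
--             start = int(token)
--             end = int(tokens[1])
--             coords += [row + str(col) for col in range(start, end + 1)]
--             tokens = tokens[2:]
--         elif tokens and tokens[0] == ",":
--             while True:
--                 if token[0].isnumeric():
--                     coords.append(row + token)
--                 else:
--                     row = token[0]
--                     coords.append(token)
--                 if not tokens or tokens[0] != ",":
--                     break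
--                 tokens.pop(0)  # Comma
--                 token = tokens.pop(0)
--         else:
--             coords.append(row + token)
--     return coords
-- ===== SOURCE B (Python) =====
-- def parseBKFociGridCoords(gridcoord):
--     if gridcoord == "?":
--         # One of the data points is just ?
--         return []
--     s = gridcoord
--     n = len(s)
--
--     def tok(i):
--         """Read the single token starting at position i; return (token, next position).
--         Returns (None, i) at the end of the string.  Tokenization is purely local,
--         so tokens can be produced on demand instead of materialized up front."""
--         if i >= n:
--             return None, i
--         if s[i] == "," or (i + 1 < n and s[i + 1] == ","):
--             return s[i], i + 1
--         if i + 2 >= n or not s[i + 2].isnumeric() or s[i] == ".":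
--             return s[i:i + 2], i + 2
--         return s[i:i + 3], i + 3
--
--     coords = []
--     i = 0
--     while i < n:
--         token, i = tok(i)
--         row, rest = token[0], token[1:]
--         nxt, j = tok(i)
--         if nxt == "..":
--             # Range
--             etok, i = tok(j)
--             for col in range(int(rest), int(etok) + 1):
--                 coords.append(row + str(col))
--         elif nxt == ",":
--             while True:
--                 if rest[0].isnumeric():
--                     coords.append(row + rest)
--                 else:
--                     row = rest[0]
--                     coords.append(rest)
--                 nxt, j = tok(i)
--                 if nxt != ",":
--                     break
--                 rest, i = tok(j)
--         else:
--             coords.append(row + rest)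
--     return coords
-- ===== Notes on version B (the rewrite author's own statement) =====
-- stated objective: faster
-- what changed: B never builds the intermediate token list at all: a local tok(i) function reads one token on demand from an index cursor, and a single consuming loop walks the string directly, replacing A's two staged passes with their quadratic string re-slicing (gridcoord = gridcoord[1:]) and list.pop(0)/tokens[2:] shifting.
import Mathlib
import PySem

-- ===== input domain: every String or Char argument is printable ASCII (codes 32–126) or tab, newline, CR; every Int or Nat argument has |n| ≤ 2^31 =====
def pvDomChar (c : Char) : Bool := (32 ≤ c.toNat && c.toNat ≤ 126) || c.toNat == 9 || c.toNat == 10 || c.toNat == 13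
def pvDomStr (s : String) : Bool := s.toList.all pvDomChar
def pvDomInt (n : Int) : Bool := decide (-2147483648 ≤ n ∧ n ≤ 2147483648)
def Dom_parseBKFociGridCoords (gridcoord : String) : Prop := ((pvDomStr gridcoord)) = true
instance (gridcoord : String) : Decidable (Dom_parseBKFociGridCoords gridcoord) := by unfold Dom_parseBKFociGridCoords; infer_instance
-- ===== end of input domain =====

-- B drops A's two staged passes (materialize a token list by repeated string re-slicing,
-- then consume it with pop(0)/tokens[2:]): it reads tokens on demand with an index-cursor
-- tok(i) helper and emits coordinates in one direct walk over the string (objective: faster).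
-- Where Python raises (IndexError/ValueError/TypeError on malformed token streams) the ports
-- use total defaults; exactly those inputs are excluded by Pre_parseBKFociGridCoords.
-- '.isnumeric()' is ported as PySem.Chars.isdigit, exact on the ASCII domain Dom_.

-- ===== PORT A =====
-- Every loop is ported with an explicit fuel argument (structural recursion; the callers pass
-- a fuel that provably never runs out, so the fuel guard only makes the computation total).

-- tokenizer loop of A: 'while gridcoord: ... tokens.append(...); gridcoord = gridcoord[k:]'
-- (each iteration consumes at least one char, so fuel = length of the string suffices)
def pvTokA : Nat → List Char → List (List Char)
  | 0, _ => []
  | fuel + 1, s =>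
    if s.length = 0 then []
    else if s.getD 0 ' ' = ',' ∨ (1 < s.length ∧ s.getD 1 ' ' = ',') then
      [s.getD 0 ' '] :: pvTokA fuel (s.drop 1)
    else if s.length < 3 ∨ ¬ PySem.Chars.isdigit (s.getD 2 ' ') ∨ s.getD 0 ' ' = '.' then
      (s.take 2) :: pvTokA fuel (s.drop 2)
    else
      (s.take 3) :: pvTokA fuel (s.drop 3)

-- inner 'while True' comma chain of A; the two pop(0) are tokens[0]/tokens[1] + drop 2;
-- returns (remaining tokens, coords).  On Python's 'pop from empty' (comma is the last
-- token, outside Pre_) the defaults give getD 1 [] = [].  Each continuing iteration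
-- consumes two tokens, so fuel = tokens.length + 1 suffices.
def pvChainA : Nat → Char → List Char → List (List Char) → List String →
    List (List Char) × List String
  | 0, _, _, tokens, coords => (tokens, coords)
  | fuel + 1, row, cur, tokens, coords =>
    let row' := if PySem.Chars.isdigit (cur.getD 0 ' ') then row else cur.getD 0 ' '
    let coords' := coords ++
      [if PySem.Chars.isdigit (cur.getD 0 ' ') then String.ofList (row :: cur) else String.ofList cur]
    if tokens.length ≠ 0 ∧ tokens.getD 0 [] = [','] then
      pvChainA fuel row' (tokens.getD 1 []) (tokens.drop 2) coords'
    else (tokens, coords')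

-- consumer loop of A: 'while tokens: token = tokens.pop(0) ...'
-- (each iteration consumes at least one token, so fuel = tokens.length suffices)
def pvConsA : Nat → List (List Char) → List String → List String
  | 0, _, coords => coords
  | fuel + 1, tokens, coords =>
    if tokens.length ≠ 0 then
      let token := tokens.getD 0 []
      let rest := tokens.drop 1
      let row := token.getD 0 ' '
      let tk := token.drop 1
      if rest.length ≠ 0 ∧ rest.getD 0 [] = ['.', '.'] then
        let st := (PySem.Int.ofChars? tk).getD 0            -- int() ValueError outside Pre_
        let en := (PySem.Int.ofChars? (rest.getD 1 [])).getD 0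
        pvConsA fuel (rest.drop 2)
          (coords ++ (PySem.List.pyRange st (en + 1) 1).map
            (fun col => String.ofList (row :: PySem.Int.toChars col)))
      else if rest.length ≠ 0 ∧ rest.getD 0 [] = [','] then
        let p := pvChainA (rest.length + 1) row tk rest coords
        pvConsA fuel p.1 p.2
      else
        pvConsA fuel rest (coords ++ [String.ofList (row :: tk)])
    else coords

def parseBKFociGridCoords (gridcoord : String) : List String :=
  if gridcoord = "?" then []
  else
    let tokens := pvTokA gridcoord.toList.length gridcoord.toList
    pvConsA tokens.length tokens []

-- ===== PORT B =====
-- B's local 'tok(i)': read the single token starting at index i of s;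
-- returns (token, next index); (none, i) at the end of the string
def pvTok? (s : List Char) (i : Nat) : Option (List Char) × Nat :=
  if i < s.length then
    if s.getD i ' ' = ',' ∨ (i + 1 < s.length ∧ s.getD (i + 1) ' ' = ',') then
      (some [s.getD i ' '], i + 1)
    else if i + 2 ≥ s.length ∨ ¬ PySem.Chars.isdigit (s.getD (i + 2) ' ') ∨ s.getD i ' ' = '.' then
      (some ((s.drop i).take 2), i + 2)
    else (some ((s.drop i).take 3), i + 3)
  else (none, i)

-- B's inner 'while True' comma chain: appends a coordinate, then peeks the next token;
-- returns (new cursor, coords).  rest = None (comma at the end, outside Pre_) is the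
-- default [] here.  Each continuing iteration advances the cursor by at least 2.
def pvChainB : Nat → List Char → Nat → Char → List Char → List String → Nat × List String
  | 0, _, i, _, _, coords => (i, coords)
  | fuel + 1, s, i, row, cur, coords =>
    let row' := if PySem.Chars.isdigit (cur.getD 0 ' ') then row else cur.getD 0 ' '
    let coords' := coords ++
      [if PySem.Chars.isdigit (cur.getD 0 ' ') then String.ofList (row :: cur) else String.ofList cur]
    let nx := pvTok? s i
    if nx.1 = some [','] then
      let t2 := pvTok? s nx.2
      pvChainB fuel s t2.2 row' (t2.1.getD []) coords'
    else (i, coords')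

-- B's single consuming loop 'while i < n: token, i = tok(i) ...' over the string itself
-- (no token list); each iteration advances the cursor, so fuel = length suffices
def pvParseB : Nat → List Char → Nat → List String → List String
  | 0, _, _, coords => coords
  | fuel + 1, s, i, coords =>
    match pvTok? s i with
    | (none, _) => coords
    | (some token, i1) =>
      let row := token.getD 0 ' '
      let rest := token.drop 1
      let nx := pvTok? s i1
      if nx.1 = some ['.', '.'] then
        let et := pvTok? s nx.2
        let st := (PySem.Int.ofChars? rest).getD 0          -- int() raises outside Pre_
        let en := (PySem.Int.ofChars? (et.1.getD [])).getD 0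
        pvParseB fuel s et.2
          (coords ++ (PySem.List.pyRange st (en + 1) 1).map
            (fun col => String.ofList (row :: PySem.Int.toChars col)))
      else if nx.1 = some [','] then
        let p := pvChainB (s.length + 1) s i1 row rest coords
        pvParseB fuel s p.1 p.2
      else
        pvParseB fuel s i1 (coords ++ [String.ofList (row :: rest)])

def parseBKFociGridCoords_alt (gridcoord : String) : List String :=
  if gridcoord = "?" then []
  else pvParseB gridcoord.toList.length gridcoord.toList 0 []

-- ===== PRECONDITION & SPEC =====
-- Pre_ excludes exactly the inputs on which Python A raises: a '..' token not followed by an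
-- int-parsable bound or not preceded by an int-parsable start (ValueError / IndexError), a
-- comma token that is the last token (pop from an empty list), and a length-1 token directly
-- followed by a comma token (token[1:] is empty, so token[0] raises IndexError).  It is stated
-- as a grammar over the token segmentation of the input (pvPreTok, independent of the ports).
-- token segmentation of the input (structural; a reader checks it char by char: a char before
-- a comma or the comma itself is a 1-char token, otherwise 2 chars, or 3 when the 3rd is a digit)
def pvPreTok : List Char → List (List Char)
  | [] => []
  | [c0] => [[c0]]
  | [c0, c1] =>
    if c0 = ',' ∨ c1 = ',' then [c0] :: pvPreTok [c1]
    else [[c0, c1]]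
  | c0 :: c1 :: c2 :: rest =>
    if c0 = ',' ∨ c1 = ',' then [c0] :: pvPreTok (c1 :: c2 :: rest)
    else if ¬ PySem.Chars.isdigit c2 ∨ c0 = '.' then [c0, c1] :: pvPreTok (c2 :: rest)
    else [c0, c1, c2] :: pvPreTok rest

-- grammar of the token streams the consumer finishes on without raising
-- (mode = false: token list; mode = true: comma chain starting at the comma token)
def pvGoodAux : Bool → List (List Char) → Bool
  | _, [] => true
  | false, [_] => true
  | true, [_] => false
  | false, t :: r0 :: rest =>
    if r0 = ['.', '.'] then
      match rest with
      | e :: rest2 =>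
          (PySem.Int.ofChars? (t.drop 1)).isSome
            && (PySem.Int.ofChars? e).isSome && pvGoodAux false rest2
      | [] => false
    else if r0 = [','] then decide (2 ≤ t.length) && pvGoodAux true (r0 :: rest)
    else pvGoodAux false (r0 :: rest)
  | true, _ :: _ :: rest =>
    match rest with
    | r :: _ => if r = [','] then pvGoodAux true rest else pvGoodAux false rest
    | [] => true

def Pre_parseBKFociGridCoords (gridcoord : String) : Prop :=
  gridcoord = "?" ∨ pvGoodAux false (pvPreTok gridcoord.toList) = true
instance (gridcoord : String) : Decidable (Pre_parseBKFociGridCoords gridcoord) := by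
  unfold Pre_parseBKFociGridCoords; infer_instance

def pvWitness_parseBKFociGridCoords : String := "A1..3"

def Spec_parseBKFociGridCoords (gridcoord : String) (out : List String) : Prop := out = parseBKFociGridCoords_alt gridcoord
instance (gridcoord : String) (out : List String) : Decidable (Spec_parseBKFociGridCoords gridcoord out) := by unfold Spec_parseBKFociGridCoords; infer_instance

-- ===== CLAIM (what is proved, stated in full; the proofs are below) =====
def Claim_equal_parseBKFociGridCoords : Prop := ∀ (gridcoord : String), Dom_parseBKFociGridCoords gridcoord → Pre_parseBKFociGridCoords gridcoord → Spec_parseBKFociGridCoords gridcoord (parseBKFociGridCoords gridcoord)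

-- ===== LEMMAS AND PROOFS =====

-- the token stream of the suffix of s starting at index i (A's eager tokenization of it)
def pvTks (s : List Char) (i : Nat) : List (List Char) := pvTokA (s.length - i) (s.drop i)

theorem pvGetD_drop {α : Type} (l : List α) (n m : Nat) (d : α) :
    (l.drop n).getD m d = l.getD (n + m) d := by
  simp [List.getD_eq_getElem?_getD, List.getElem?_drop]

-- pvTokA is fuel-insensitive once the fuel covers the string length
theorem tokA_nil (f : Nat) : pvTokA f [] = [] := by
  cases f <;> rfl

theorem tokA_fuel (f g : Nat) (s : List Char) (hf : s.length ≤ f) (hg : s.length ≤ g) :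
    pvTokA f s = pvTokA g s := by
  induction f generalizing g s with
  | zero =>
    have : s = [] := List.eq_nil_of_length_eq_zero (by omega)
    subst this; rw [tokA_nil, tokA_nil]
  | succ f ih =>
    cases g with
    | zero =>
      have : s = [] := List.eq_nil_of_length_eq_zero (by omega)
      subst this; rw [tokA_nil, tokA_nil]
    | succ g =>
      by_cases h0 : s.length = 0
      · have : s = [] := List.eq_nil_of_length_eq_zero h0
        subst this; rw [tokA_nil, tokA_nil]
      · rw [pvTokA, pvTokA, if_neg h0, if_neg h0]
        split_ifs
        · rw [ih g (s.drop 1) (by simp; omega) (by simp; omega)]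
        · rw [ih g (s.drop 2) (by simp; omega) (by simp; omega)]
        · rw [ih g (s.drop 3) (by simp; omega) (by simp; omega)]

theorem tokA_len (f : Nat) (s : List Char) : (pvTokA f s).length ≤ s.length := by
  induction f generalizing s with
  | zero => simp [pvTokA]
  | succ f ih =>
    rw [pvTokA]
    split_ifs with h0 h1 h2
    · simp
    · have := ih (s.drop 1); simp at this ⊢; omega
    · have := ih (s.drop 2); simp at this ⊢; omega
    · have := ih (s.drop 3); simp at this ⊢; omega

theorem tks_none (s : List Char) (i : Nat) (h : ¬ i < s.length) : pvTks s i = [] := by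
  unfold pvTks
  have : s.length - i = 0 := by omega
  rw [this, pvTokA]

-- one on-demand token = head of the eager token stream
theorem tks_step (s : List Char) (i : Nat) (h : i < s.length) :
    pvTks s i = ((pvTok? s i).1.getD []) :: pvTks s (pvTok? s i).2 ∧ (pvTok? s i).1.isSome := by
  unfold pvTks pvTok?
  rw [if_pos h]
  obtain ⟨m, hm⟩ : ∃ m, s.length - i = m + 1 := ⟨s.length - i - 1, by omega⟩
  rw [hm, pvTokA]
  have g0 : (s.drop i).getD 0 ' ' = s.getD i ' ' := by simp
  have g1 : (s.drop i).getD 1 ' ' = s.getD (i + 1) ' ' := pvGetD_drop s i 1 ' '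
  have g2 : (s.drop i).getD 2 ' ' = s.getD (i + 2) ' ' := pvGetD_drop s i 2 ' '
  have e0 : ((s.drop i).length = 0) = False := eq_false (by simp only [List.length_drop]; omega)
  have e1 : (1 < (s.drop i).length) = (i + 1 < s.length) := by
    simp only [List.length_drop]; exact propext (by omega)
  have e2 : ((s.drop i).length < 3) = (i + 2 ≥ s.length) := by
    simp only [List.length_drop]; exact propext (by omega)
  have d1 : (s.drop i).drop 1 = s.drop (i + 1) := by rw [List.drop_drop]
  have d2 : (s.drop i).drop 2 = s.drop (i + 2) := by rw [List.drop_drop]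
  have d3 : (s.drop i).drop 3 = s.drop (i + 3) := by rw [List.drop_drop]
  simp only [g0, g1, g2, e0, e1, e2, d1, d2, d3, if_false]
  split_ifs with h1 h2
  · refine ⟨?_, rfl⟩
    have : m = s.length - (i + 1) := by omega
    rw [this]
    rfl
  · refine ⟨?_, rfl⟩
    simp only [Option.getD_some, List.cons.injEq, true_and]
    exact tokA_fuel m (s.length - (i + 2)) (s.drop (i + 2))
      (by simp only [List.length_drop]; omega) (by simp only [List.length_drop]; omega)
  · refine ⟨?_, rfl⟩
    simp only [Option.getD_some, List.cons.injEq, true_and]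
    exact tokA_fuel m (s.length - (i + 3)) (s.drop (i + 3))
      (by simp only [List.length_drop]; omega) (by simp only [List.length_drop]; omega)

theorem tks_len (s : List Char) (i : Nat) : (pvTks s i).length ≤ s.length := by
  unfold pvTks
  calc (pvTokA (s.length - i) (s.drop i)).length ≤ (s.drop i).length := tokA_len _ _
    _ ≤ s.length := by simp only [List.length_drop]; omega

-- A's chain never lengthens the token list
theorem chainA_consumes (f : Nat) (row : Char) (cur : List Char) (toks : List (List Char))
    (coords : List String) : (pvChainA f row cur toks coords).1.length ≤ toks.length := by
  induction f generalizing row cur toks coords with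
  | zero => simp [pvChainA]
  | succ f ih =>
    rw [pvChainA]
    split_ifs <;>
      first
        | (refine le_trans (ih _ _ _ _) ?_; simp only [List.length_drop]; omega)
        | simp

-- pvChainA is fuel-insensitive once the fuel exceeds the token-list length
theorem chainA_fuel (f g : Nat) (row : Char) (cur : List Char) (toks : List (List Char))
    (coords : List String) (hf : toks.length < f) (hg : toks.length < g) :
    pvChainA f row cur toks coords = pvChainA g row cur toks coords := by
  induction f generalizing g row cur toks coords with
  | zero => omega
  | succ f ih =>
    cases g with
    | zero => omega
    | succ g =>
      rw [pvChainA, pvChainA]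
      split_ifs <;>
        first
          | rfl
          | exact ih g _ _ _ _ (by simp only [List.length_drop]; omega)
              (by simp only [List.length_drop]; omega)

-- lockstep: A's chain on the eager token stream = B's chain on the cursor (same fuel)
theorem chain_lock (s : List Char) (f : Nat) (i : Nat) (row : Char) (cur : List Char)
    (coords : List String) :
    pvChainA f row cur (pvTks s i) coords
      = (pvTks s (pvChainB f s i row cur coords).1, (pvChainB f s i row cur coords).2) := by
  induction f generalizing i row cur coords with
  | zero => rfl
  | succ f ih =>
    by_cases hi : i < s.length
    · obtain ⟨hstep, hsome⟩ := tks_step s i hi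
      obtain ⟨tok, htok⟩ := Option.isSome_iff_exists.mp hsome
      rw [htok] at hstep
      simp only [Option.getD_some] at hstep
      simp only [pvChainA, pvChainB, hstep, htok]
      by_cases hc : tok = [',']
      · subst hc
        rw [if_pos ⟨by simp, rfl⟩, if_pos rfl]
        have harg : ((List.cons ',' []) :: pvTks s (pvTok? s i).2).getD 1 []
              = (pvTok? s (pvTok? s i).2).1.getD []
            ∧ ((List.cons ',' []) :: pvTks s (pvTok? s i).2).drop 2
              = pvTks s (pvTok? s (pvTok? s i).2).2 := by
          by_cases h2 : (pvTok? s i).2 < s.length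
          · obtain ⟨hstep2, _⟩ := tks_step s (pvTok? s i).2 h2
            exact ⟨by rw [hstep2]; simp, by rw [hstep2]; simp⟩
          · have hn := tks_none s (pvTok? s i).2 h2
            have hv : pvTok? s (pvTok? s i).2 = (none, (pvTok? s i).2) := by
              generalize (pvTok? s i).2 = j at h2 ⊢
              unfold pvTok?; rw [if_neg h2]
            exact ⟨by rw [hn, hv]; simp, by rw [hn, hv]; simp [hn]⟩
        rw [harg.1, harg.2]
        exact ih _ _ _ _
      · rw [if_neg (fun h => hc (by simpa using h.2)),
            if_neg (fun h => hc (Option.some.inj h))]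
        simp [hstep]
    · have hn := tks_none s i hi
      have hv : pvTok? s i = (none, i) := by
        generalize hg : i = j
        rw [hg] at hi
        unfold pvTok?; rw [if_neg hi]
      simp [pvChainA, pvChainB, hn, hv]

-- pvConsA is fuel-insensitive once the fuel covers the token-list length
theorem consA_fuel (f g : Nat) (toks : List (List Char)) (coords : List String)
    (hf : toks.length ≤ f) (hg : toks.length ≤ g) :
    pvConsA f toks coords = pvConsA g toks coords := by
  induction f generalizing g toks coords with
  | zero =>
    have : toks = [] := List.eq_nil_of_length_eq_zero (by omega)
    subst this
    cases g <;> simp [pvConsA]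
  | succ f ih =>
    cases g with
    | zero =>
      have : toks = [] := List.eq_nil_of_length_eq_zero (by omega)
      subst this
      simp [pvConsA]
    | succ g =>
      simp only [pvConsA]
      split_ifs with h1 h2 h3
      · refine ih g _ _ ?_ ?_ <;> simp only [List.length_drop] <;> omega
      · refine ih g _ _ ?_ ?_ <;>
          (calc (pvChainA (toks.drop 1).length.succ _ _ (toks.drop 1) coords).1.length
                ≤ (toks.drop 1).length := chainA_consumes _ _ _ _ _
            _ ≤ _ := by simp only [List.length_drop]; omega)
      · refine ih g _ _ ?_ ?_ <;> simp only [List.length_drop] <;> omega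
      · rfl

-- lockstep: A's consumer on the eager token stream = B's direct walk (same fuel)
theorem cons_lock (s : List Char) (f : Nat) (i : Nat) (coords : List String) :
    pvConsA f (pvTks s i) coords = pvParseB f s i coords := by
  induction f generalizing i coords with
  | zero => rfl
  | succ f ih =>
    by_cases hi : i < s.length
    · obtain ⟨hstep, hsome⟩ := tks_step s i hi
      obtain ⟨o, i1, hoi⟩ : ∃ o i1, pvTok? s i = (o, i1) := ⟨_, _, rfl⟩
      rw [hoi] at hstep hsome
      simp only at hstep hsome
      obtain ⟨tok, htok⟩ := Option.isSome_iff_exists.mp hsome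
      subst htok
      simp only [Option.getD_some] at hstep
      -- hstep : pvTks s i = tok :: pvTks s i1
      simp only [pvConsA, pvParseB, hstep, hoi]
      rw [if_pos (by simp : ((tok :: pvTks s i1).length ≠ 0))]
      simp only [List.getD_cons_zero, List.drop_succ_cons, List.drop_zero]
      by_cases h1 : i1 < s.length
      · obtain ⟨hstep1, hsome1⟩ := tks_step s i1 h1
        obtain ⟨o1, i2, hoi1⟩ : ∃ o1 i2, pvTok? s i1 = (o1, i2) := ⟨_, _, rfl⟩
        rw [hoi1] at hstep1 hsome1
        simp only at hstep1 hsome1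
        obtain ⟨tok1, htok1⟩ := Option.isSome_iff_exists.mp hsome1
        subst htok1
        simp only [Option.getD_some] at hstep1
        -- hstep1 : pvTks s i1 = tok1 :: pvTks s i2
        simp only [hstep1, hoi1]
        by_cases hdd : tok1 = ['.', '.']
        · subst hdd
          rw [if_pos ⟨by simp, by simp⟩, if_pos rfl]
          have harg : (pvTks s i2).getD 0 [] = (pvTok? s i2).1.getD []
              ∧ (pvTks s i2).drop 1 = pvTks s (pvTok? s i2).2 := by
            by_cases h2 : i2 < s.length
            · obtain ⟨hstep2, _⟩ := tks_step s i2 h2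
              exact ⟨by rw [hstep2]; simp, by rw [hstep2]; simp⟩
            · have hn := tks_none s i2 h2
              have hv : pvTok? s i2 = (none, i2) := by
                unfold pvTok?; rw [if_neg h2]
              exact ⟨by rw [hn, hv]; simp, by rw [hn, hv]; simp [hn]⟩
          have hg1 : (['.', '.'] :: pvTks s i2).getD 1 [] = (pvTok? s i2).1.getD [] := by
            simpa using harg.1
          have hg2 : (['.', '.'] :: pvTks s i2).drop 2 = pvTks s (pvTok? s i2).2 := by
            simpa using harg.2
          rw [hg1, hg2]
          exact ih _ _
        · rw [if_neg (fun h => hdd (by simpa using h.2)),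
              if_neg (fun h => hdd (Option.some.inj h))]
          by_cases hcm : tok1 = [',']
          · subst hcm
            rw [if_pos ⟨by simp, by simp⟩, if_pos rfl]
            have hcl := chain_lock s (s.length + 1) i1 (tok.getD 0 ' ') (tok.drop 1) coords
            have hfa : pvChainA (([','] :: pvTks s i2).length + 1) (tok.getD 0 ' ')
                  (tok.drop 1) ([','] :: pvTks s i2) coords
                = pvChainA (s.length + 1) (tok.getD 0 ' ')
                  (tok.drop 1) ([','] :: pvTks s i2) coords :=
              chainA_fuel _ _ _ _ _ _ (by omega)
                (by have := tks_len s i1; rw [hstep1] at this; omega)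
            rw [hstep1] at hcl
            rw [hfa, hcl]
            exact ih _ _
          · rw [if_neg (fun h => hcm (by simpa using h.2)),
                if_neg (fun h => hcm (Option.some.inj h))]
            rw [← hstep1]
            exact ih _ _
      · have hn1 := tks_none s i1 h1
        have hv1 : pvTok? s i1 = (none, i1) := by
          unfold pvTok?; rw [if_neg h1]
        simp only [hn1, hv1]
        rw [if_neg (by simp), if_neg (by simp)]
        rw [if_neg (by simp), if_neg (by simp)]
        rw [← hn1]
        exact ih _ _
    · have hn := tks_none s i hi
      have hv : pvTok? s i = (none, i) := by
        unfold pvTok?; rw [if_neg hi]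
      rw [pvConsA, pvParseB, hn, hv]
      rfl

theorem ab_eq (g : String) : parseBKFociGridCoords g = parseBKFociGridCoords_alt g := by
  unfold parseBKFociGridCoords parseBKFociGridCoords_alt
  split
  · rfl
  · have hT : pvTks g.toList 0 = pvTokA g.toList.length g.toList := by
      unfold pvTks; simp
    have h1 : pvConsA (pvTokA g.toList.length g.toList).length
          (pvTokA g.toList.length g.toList) []
        = pvConsA g.toList.length (pvTokA g.toList.length g.toList) [] :=
      consA_fuel _ _ _ _ (le_refl _) (tokA_len _ _)
    rw [h1, ← hT, cons_lock]

-- ===== VERDICT (by name: the statement is the Claim_ definition above) =====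
theorem parseBKFociGridCoords_spec : Claim_equal_parseBKFociGridCoords := by
  intro g _ _
  unfold Spec_parseBKFociGridCoords
  exact ab_eq g
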